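-- pv_equiv track=rewrite | github.com/whoown/study-ai | envs/vpn/vpn_setup.py | update_sysctl_key
-- ===== SOURCE A (Python) =====
-- def update_sysctl_key(lines, key, value):
--     """更新 sysctl 配置项；存在则覆盖，不存在则追加。"""
--     new_line = f"{key}={value}\n"
--     replaced = False
--     updated_lines = []
--     for line in lines:
--         stripped = line.strip()
--         if stripped.startswith(f"{key}="):
--             if not replaced:
--                 updated_lines.append(new_line)
--                 replaced = True
--             continue
--         updated_lines.append(line)
--     if not replaced:
--         updated_lines.append(new_line)
--     return updated_lines
-- ===== SOURCE B (Python) =====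
-- def update_sysctl_key(lines, key, value):
--     """更新 sysctl 配置项；存在则覆盖，不存在则追加。"""
--     new_line = f"{key}={value}\n"
--     prefix = f"{key}="
--     idxs = [i for i, line in enumerate(lines) if line.strip().startswith(prefix)]
--     if not idxs:
--         return list(lines) + [new_line]
--     first = idxs[0]
--     drop = set(idxs)
--     out = []
--     for i, line in enumerate(lines):
--         if i == first:
--             out.append(new_line)
--         elif i not in drop:
--             out.append(line)
--     return out
-- ===== Notes on version B (the rewrite author's own statement) =====
-- stated objective: alternative
-- what changed: Replaces A's single flag-guarded accumulator loop with two staged passes: a first pass builds an index table of all matching lines, then a second index-driven pass reconstructs the list, emitting the new line at the first recorded index and dropping the indices in the table.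
import Mathlib
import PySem

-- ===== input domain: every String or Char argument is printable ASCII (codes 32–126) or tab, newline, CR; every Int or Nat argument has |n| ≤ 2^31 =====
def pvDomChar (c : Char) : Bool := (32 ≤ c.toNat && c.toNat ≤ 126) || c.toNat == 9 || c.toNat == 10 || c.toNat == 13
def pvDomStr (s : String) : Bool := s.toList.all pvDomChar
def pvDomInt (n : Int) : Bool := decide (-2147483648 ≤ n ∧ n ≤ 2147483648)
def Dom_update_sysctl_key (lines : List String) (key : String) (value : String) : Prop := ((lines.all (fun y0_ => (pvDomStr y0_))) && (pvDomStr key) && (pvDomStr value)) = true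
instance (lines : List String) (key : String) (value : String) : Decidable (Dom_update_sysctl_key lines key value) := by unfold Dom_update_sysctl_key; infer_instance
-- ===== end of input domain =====

-- B replaces A's single flag-guarded loop with two staged passes: build an index
-- table of all matching lines, then reconstruct index-by-index (objective: alternative).

-- ===== PORT A =====
def update_sysctl_key (lines : List String) (key : String) (value : String) : List String :=
  let newLine := key ++ "=" ++ value ++ "\n"
  let res := lines.foldl (fun (st : Bool × List String) line =>
      let stripped := PySem.Str.strip line
      if PySem.Str.startswith stripped (key ++ "=") then
        if !st.1 then (true, st.2 ++ [newLine]) else st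
      else (st.1, st.2 ++ [line])) (false, ([] : List String))
  if !res.1 then res.2 ++ [newLine] else res.2

-- ===== PORT B =====
-- pass 1 of Source B: the comprehension over enumerate(lines) collecting matching indices
def bIdxs (pred : String → Bool) : Int → List String → List Int
  | _, [] => []
  | n, l :: ls => if pred l then n :: bIdxs pred (n + 1) ls else bIdxs pred (n + 1) ls

-- pass 2 of Source B: the index-driven reconstruction loop over enumerate(lines)
def bPass (newLine : String) (first : Int) (drop : PySem.Set Int) : Int → List String → List String
  | _, [] => []
  | i, l :: ls =>
      if i = first then newLine :: bPass newLine first drop (i + 1) ls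
      else if PySem.Set.contains drop i then bPass newLine first drop (i + 1) ls
      else l :: bPass newLine first drop (i + 1) ls

def update_sysctl_key_alt (lines : List String) (key : String) (value : String) : List String :=
  let newLine := key ++ "=" ++ value ++ "\n"
  let pred := fun (l : String) => PySem.Str.startswith (PySem.Str.strip l) (key ++ "=")
  match bIdxs pred 0 lines with
  | [] => lines ++ [newLine]
  | first :: rest =>
      let drop := PySem.Set.ofList (first :: rest)
      bPass newLine first drop 0 lines

-- ===== PRECONDITION & SPEC =====
def Spec_update_sysctl_key (lines : List String) (key : String) (value : String) (out : List String) : Prop := out = update_sysctl_key_alt lines key value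
instance (lines : List String) (key : String) (value : String) (out : List String) : Decidable (Spec_update_sysctl_key lines key value out) := by unfold Spec_update_sysctl_key; infer_instance

-- ===== CLAIM (what is proved, stated in full; the proofs are below) =====
def Claim_equal_update_sysctl_key : Prop := ∀ (lines : List String) (key : String) (value : String), Dom_update_sysctl_key lines key value → Spec_update_sysctl_key lines key value (update_sysctl_key lines key value)

-- ===== LEMMAS AND PROOFS =====

-- proof-level canonical form: 'none' = no line matches, 'some r' = r is the result
def altGo (pred : String → Bool) (newLine : String) : List String → Option (List String)
  | [] => none
  | l :: ls =>
      if pred l then some (newLine :: ls.filter (fun x => !pred x))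
      else (altGo pred newLine ls).map (fun r => l :: r)

-- once A's flag is set, the rest of the loop just filters, and no trailing append happens
lemma aLoop_replaced (pred : String → Bool) (newLine : String) :
    ∀ (ls : List String) (acc : List String),
      ls.foldl (fun (st : Bool × List String) line =>
          if pred line = true then
            if st.1 = false then (true, st.2 ++ [newLine]) else st
          else (st.1, st.2 ++ [line])) (true, acc)
        = (true, acc ++ ls.filter (fun x => !pred x)) := by
  intro ls
  induction ls with
  | nil => simp
  | cons l ls ih =>
      intro acc
      by_cases h : pred l = true <;> simp [h, ih]

-- A's loop from an unset flag computes acc ++ the canonical form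
lemma aLoop_unset (pred : String → Bool) (newLine : String) :
    ∀ (ls : List String) (acc : List String),
      (let res := ls.foldl (fun (st : Bool × List String) line =>
          if pred line = true then
            if st.1 = false then (true, st.2 ++ [newLine]) else st
          else (st.1, st.2 ++ [line])) (false, acc)
       if res.1 = false then res.2 ++ [newLine] else res.2)
        = acc ++ (altGo pred newLine ls).getD (ls ++ [newLine]) := by
  intro ls
  induction ls with
  | nil => simp [altGo]
  | cons l ls ih =>
      intro acc
      by_cases h : pred l = true
      · simp [h, altGo, aLoop_replaced]
      · have h2 := ih (acc ++ [l])
        simp [h, altGo] at h2 ⊢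
        exact h2

-- every index in the table is ≥ the starting offset
lemma bIdxs_ge (pred : String → Bool) :
    ∀ (ls : List String) (n i : Int), i ∈ bIdxs pred n ls → n ≤ i := by
  intro ls
  induction ls with
  | nil => intro n i h; simp [bIdxs] at h
  | cons l ls ih =>
      intro n i h
      by_cases hp : pred l = true <;> simp [bIdxs, hp] at h
      · rcases h with h | h
        · omega
        · have := ih (n + 1) i h; omega
      · have := ih (n + 1) i h; omega

-- an empty index table means no line matches, and conversely
lemma bIdxs_nil_iff (pred : String → Bool) :
    ∀ (ls : List String) (n : Int), bIdxs pred n ls = [] ↔ ∀ l ∈ ls, pred l = false := by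
  intro ls
  induction ls with
  | nil => intro n; simp [bIdxs]
  | cons l ls ih =>
      intro n
      by_cases hp : pred l = true
      · simp only [bIdxs, hp, if_true]
        constructor
        · intro h; exact absurd h (List.cons_ne_nil _ _)
        · intro h; rw [h l (by simp)] at hp; simp at hp
      · have hpf : pred l = false := by simpa using hp
        simp [bIdxs, hpf, ih (n + 1)]

lemma altGo_eq_none_iff (pred : String → Bool) (newLine : String) :
    ∀ ls : List String, altGo pred newLine ls = none ↔ ∀ l ∈ ls, pred l = false := by
  intro ls
  induction ls with
  | nil => simp [altGo]
  | cons l ls ih =>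
      by_cases hp : pred l = true
      · simp [altGo, hp]
      · have hpf : pred l = false := by simpa using hp
        simp [altGo, hpf, ih]

-- after the first match, the second pass is a pure filter
lemma bPass_tail (pred : String → Bool) (newLine : String) (first : Int) (drop : PySem.Set Int) :
    ∀ (ls : List String) (m : Int), first < m →
      (∀ i : Int, m ≤ i → (i ∈ (drop : List Int) ↔ i ∈ bIdxs pred m ls)) →
      bPass newLine first drop m ls = ls.filter (fun x => !pred x) := by
  intro ls
  induction ls with
  | nil => intro m _ _; simp [bPass]
  | cons l ls ih =>
      intro m hm hD
      have hne : ¬ (m = first) := by omega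
      have hmem : m ∈ (drop : List Int) ↔ pred l = true := by
        rw [hD m le_rfl]
        by_cases hp : pred l = true
        · simp [bIdxs, hp]
        · have hpf : pred l = false := by simpa using hp
          simp [bIdxs, hpf]
          intro h; have := bIdxs_ge pred ls (m + 1) m h; omega
      have hD' : ∀ i : Int, m + 1 ≤ i → (i ∈ (drop : List Int) ↔ i ∈ bIdxs pred (m + 1) ls) := by
        intro i hi
        rw [hD i (by omega)]
        by_cases hp : pred l = true <;> simp [bIdxs, hp]
        intro h; omega
      by_cases hp : pred l = true
      · have hmm : m ∈ (drop : List Int) := hmem.mpr hp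
        simp [bPass, hne, hp, PySem.Set.contains, hmm, ih (m + 1) (by omega) hD']
      · have hmm : m ∉ (drop : List Int) := fun h => hp (hmem.mp h)
        simp [bPass, hne, hp, PySem.Set.contains, hmm, ih (m + 1) (by omega) hD']

-- the second pass from any offset computes the canonical form, given the table of that suffix
lemma bPass_main (pred : String → Bool) (newLine : String) (drop : PySem.Set Int) :
    ∀ (ls : List String) (n first : Int) (rest : List Int),
      (∀ i : Int, n ≤ i → (i ∈ (drop : List Int) ↔ i ∈ bIdxs pred n ls)) →
      bIdxs pred n ls = first :: rest →
      bPass newLine first drop n ls = (altGo pred newLine ls).getD (ls ++ [newLine]) := by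
  intro ls
  induction ls with
  | nil => intro n first rest _ h; simp [bIdxs] at h
  | cons l ls ih =>
      intro n first rest hD hidx
      by_cases hp : pred l = true
      · simp [bIdxs, hp] at hidx
        have hfirst : first = n := hidx.1.symm
        have hD' : ∀ i : Int, n + 1 ≤ i → (i ∈ (drop : List Int) ↔ i ∈ bIdxs pred (n + 1) ls) := by
          intro i hi
          rw [hD i (by omega)]
          simp [bIdxs, hp]
          intro h; omega
        subst hfirst
        have htail := bPass_tail pred newLine first drop ls (first + 1)
          (by omega) hD'
        simp [bPass, altGo, hp, htail]
      · simp [bIdxs, hp] at hidx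
        have hfirst : first ≠ n := by
          have : first ∈ bIdxs pred (n + 1) ls := by rw [hidx]; simp
          have := bIdxs_ge pred ls (n + 1) first this; omega
        have hnin : n ∉ (drop : List Int) := by
          rw [hD n le_rfl]
          simp [bIdxs, hp]
          intro h; have := bIdxs_ge pred ls (n + 1) n h; omega
        have hD' : ∀ i : Int, n + 1 ≤ i → (i ∈ (drop : List Int) ↔ i ∈ bIdxs pred (n + 1) ls) := by
          intro i hi
          rw [hD i (by omega)]
          simp [bIdxs, hp]
        have hrec := ih (n + 1) first rest hD' hidx
        have hsome : ∃ r, altGo pred newLine ls = some r := by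
          rcases h : altGo pred newLine ls with _ | r
          · exfalso
            have hall := (altGo_eq_none_iff pred newLine ls).mp h
            have : bIdxs pred (n + 1) ls = [] := (bIdxs_nil_iff pred ls (n + 1)).mpr hall
            rw [this] at hidx
            simp at hidx
          · exact ⟨r, rfl⟩
        rcases hsome with ⟨r, hr⟩
        rw [hr] at hrec
        simp [bPass, Ne.symm hfirst, PySem.Set.contains, hnin, altGo, hp, hr]
        simpa using hrec

-- ===== VERDICT (by name: the statement is the Claim_ definition above) =====
theorem update_sysctl_key_spec : Claim_equal_update_sysctl_key := by
  intro lines key value _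
  unfold Spec_update_sysctl_key update_sysctl_key update_sysctl_key_alt
  have hA := aLoop_unset (fun l => PySem.Str.startswith (PySem.Str.strip l) (key ++ "="))
    (key ++ "=" ++ value ++ "\n") lines []
  simp only [List.nil_append] at hA
  rcases hidx : bIdxs (fun l => PySem.Str.startswith (PySem.Str.strip l) (key ++ "=")) 0 lines
    with _ | ⟨first, rest⟩
  · -- no match: canonical form is lines ++ [newLine]
    have hall := (bIdxs_nil_iff _ lines 0).mp hidx
    have hnone := (altGo_eq_none_iff (fun l => PySem.Str.startswith (PySem.Str.strip l) (key ++ "="))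
      (key ++ "=" ++ value ++ "\n") lines).mpr hall
    rw [hnone, Option.getD_none] at hA
    simp only [hidx]
    simpa using hA
  · have hD : ∀ i : Int, (0 : Int) ≤ i →
        (i ∈ ((PySem.Set.ofList (first :: rest) : PySem.Set Int) : List Int)
          ↔ i ∈ bIdxs (fun l => PySem.Str.startswith (PySem.Str.strip l) (key ++ "=")) 0 lines) := by
      intro i _
      rw [hidx, PySem.Set.mem_ofList]
    have hB := bPass_main (fun l => PySem.Str.startswith (PySem.Str.strip l) (key ++ "="))
      (key ++ "=" ++ value ++ "\n") (PySem.Set.ofList (first :: rest)) lines 0 first rest hD hidx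
    simp only [hidx]
    rw [hB]
    simpa using hA
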